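-- pv_equiv track=rewrite | github.com/AcceleratePBE/AcceleratePBE | src/train/python/main.py | get_benchmark_flag
-- ===== SOURCE A (Python) =====
-- from enum import IntEnum
--
-- class PBESpecKind(IntEnum):
--     SOME_INPUT_BELONG_TO_OUTPUT = 0
--     SOME_OUTPUT_BELONG_TO_INPUT = 1
--     # ALL_INPUT_BELONG_TO_OUTPUT = 2
--     # ALL_OUTPUT_BELONG_TO_INPUT = 3
--     SOME_INPUT_INTERSECT_OUTPUT = 4
--     # ALL_INPUT_INTERSECT_OUTPUT = 5
--     # SOME_INPUT_BELONG_TO_SOME_INPUT = 6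
--     NO_INTERSECTION = 7
--
-- def get_benchmark_flag(example_list):
--     flags = []
--
--     def add_flag(flag):
--         if flag not in flags:
--             flags.append(flag)
--
--     def is_sub(v1, v2):
--         assert isinstance(v1, tuple) and isinstance(v2, tuple)
--         if v1[0] == "String" and v2[0] == "String":
--             return v1[1] in v2[1]
--         else:
--             return False
--
--     def is_intersecion_nonempty(v1, v2):
--         assert isinstance(v1, tuple) and isinstance(v2, tuple)
--         if v1[0] == "String" and v2[0] == "String":
--             for i in range(len(v1[1])):
--                 if v1[1][i: i+1] in v2[1]:
--                     return True
--             return False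
--         else:
--             return False
--
--     for input_list, output in example_list:
--         if any(is_sub(inp, output) for inp in input_list):
--             add_flag(PBESpecKind.SOME_INPUT_BELONG_TO_OUTPUT)
--         if any(is_sub(output, inp) for inp in input_list):
--             add_flag(PBESpecKind.SOME_OUTPUT_BELONG_TO_INPUT)
--         if any(is_intersecion_nonempty(output, inp) for inp in input_list):
--             add_flag(PBESpecKind.SOME_INPUT_INTERSECT_OUTPUT)
--     if len(flags) == 0: add_flag(PBESpecKind.NO_INTERSECTION)
--     flags = sorted(flags)
--     return str(flags)
-- ===== SOURCE B (Python) =====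
-- from enum import IntEnum
--
-- class PBESpecKind(IntEnum):
--     SOME_INPUT_BELONG_TO_OUTPUT = 0
--     SOME_OUTPUT_BELONG_TO_INPUT = 1
--     SOME_INPUT_INTERSECT_OUTPUT = 4
--     NO_INTERSECTION = 7
--
-- def get_benchmark_flag(example_list):
--     def is_sub(v1, v2):
--         assert isinstance(v1, tuple) and isinstance(v2, tuple)
--         if v1[0] == "String" and v2[0] == "String":
--             return v1[1] in v2[1]
--         return False
--
--     def is_intersecion_nonempty(v1, v2):
--         assert isinstance(v1, tuple) and isinstance(v2, tuple)
--         if v1[0] == "String" and v2[0] == "String":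
--             return any(v1[1][i:i+1] in v2[1] for i in range(len(v1[1])))
--         return False
--
--     b0 = any(is_sub(inp, output) for inputs, output in example_list for inp in inputs)
--     b1 = any(is_sub(output, inp) for inputs, output in example_list for inp in inputs)
--     b2 = any(is_intersecion_nonempty(output, inp) for inputs, output in example_list for inp in inputs)
--     flags = [kind for cond, kind in ((b0, PBESpecKind.SOME_INPUT_BELONG_TO_OUTPUT),
--                                      (b1, PBESpecKind.SOME_OUTPUT_BELONG_TO_INPUT),
--                                      (b2, PBESpecKind.SOME_INPUT_INTERSECT_OUTPUT)) if cond]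
--     if not flags:
--         flags = [PBESpecKind.NO_INTERSECTION]
--     return str(flags)
-- ===== Notes on version B (the rewrite author's own statement) =====
-- stated objective: alternative
-- what changed: Replaces A's single pass with an incrementally-maintained deduplicated flag list by three independent whole-list existence scans (one boolean per flag) and a declarative assembly of the already-sorted flag list.
import Mathlib
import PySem

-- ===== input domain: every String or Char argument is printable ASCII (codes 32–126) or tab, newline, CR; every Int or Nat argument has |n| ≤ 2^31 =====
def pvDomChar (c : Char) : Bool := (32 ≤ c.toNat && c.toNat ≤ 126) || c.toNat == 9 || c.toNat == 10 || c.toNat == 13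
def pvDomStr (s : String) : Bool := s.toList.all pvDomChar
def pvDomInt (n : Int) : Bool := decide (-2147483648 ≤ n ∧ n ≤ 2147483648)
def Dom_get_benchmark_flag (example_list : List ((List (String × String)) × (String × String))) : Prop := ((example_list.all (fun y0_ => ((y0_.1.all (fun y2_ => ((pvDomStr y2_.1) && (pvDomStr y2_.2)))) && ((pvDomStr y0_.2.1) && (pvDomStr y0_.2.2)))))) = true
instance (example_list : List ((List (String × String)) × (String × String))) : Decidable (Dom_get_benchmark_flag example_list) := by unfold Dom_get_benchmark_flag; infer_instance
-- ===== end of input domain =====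

-- B replaces A's single pass with an incrementally deduplicated flag list by three
-- independent whole-list existence scans and a declarative assembly of the sorted flag
-- list (objective: alternative decomposition, same asymptotic cost).

-- ===== PORT A =====
-- repr of a PBESpecKind member by its int value (only 0,1,4,7 occur)
def pvFlagRepr (f : Int) : String :=
  if f = 0 then "<PBESpecKind.SOME_INPUT_BELONG_TO_OUTPUT: 0>"
  else if f = 1 then "<PBESpecKind.SOME_OUTPUT_BELONG_TO_INPUT: 1>"
  else if f = 4 then "<PBESpecKind.SOME_INPUT_INTERSECT_OUTPUT: 4>"
  else if f = 7 then "<PBESpecKind.NO_INTERSECTION: 7>"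
  else ""

-- str(list) = '[' + ', '.join(repr of each element) + ']'
def pvStrOfFlags (flags : List Int) : String :=
  "[" ++ PySem.Str.join ", " (flags.map pvFlagRepr) ++ "]"

def pvIsSub (v1 v2 : String × String) : Bool :=
  if v1.1 == "String" && v2.1 == "String" then PySem.Str.isIn v1.2 v2.2 else false

def pvIsInter (v1 v2 : String × String) : Bool :=
  if v1.1 == "String" && v2.1 == "String" then
    (PySem.List.pyRange 0 (PySem.Str.len v1.2) 1).any
      (fun i => PySem.Str.isIn (PySem.Str.slice v1.2 (some i) (some (i + 1))) v2.2)
  else false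

def pvAddFlag (flags : List Int) (f : Int) : List Int :=
  if flags.contains f then flags else flags ++ [f]

def pvStep (flags : List Int) (ex : (List (String × String)) × (String × String)) : List Int :=
  let flags := if ex.1.any (fun inp => pvIsSub inp ex.2) then pvAddFlag flags 0 else flags
  let flags := if ex.1.any (fun inp => pvIsSub ex.2 inp) then pvAddFlag flags 1 else flags
  if ex.1.any (fun inp => pvIsInter ex.2 inp) then pvAddFlag flags 4 else flags

def get_benchmark_flag (example_list : List ((List (String × String)) × (String × String))) : String :=
  let flags := example_list.foldl pvStep []
  let flags := if flags.length = 0 then pvAddFlag flags 7 else flags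
  let flags := PySem.List.sorted flags (fun x => x) false
  pvStrOfFlags flags

-- ===== PORT B =====
def pvIsSubAlt (v1 v2 : String × String) : Bool :=
  if v1.1 == "String" && v2.1 == "String" then PySem.Str.isIn v1.2 v2.2 else false

def pvIsInterAlt (v1 v2 : String × String) : Bool :=
  if v1.1 == "String" && v2.1 == "String" then
    (PySem.List.pyRange 0 (PySem.Str.len v1.2) 1).any
      (fun i => PySem.Str.isIn (PySem.Str.slice v1.2 (some i) (some (i + 1))) v2.2)
  else false

def get_benchmark_flag_alt (example_list : List ((List (String × String)) × (String × String))) : String :=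
  let b0 := example_list.any (fun ex => ex.1.any (fun inp => pvIsSubAlt inp ex.2))
  let b1 := example_list.any (fun ex => ex.1.any (fun inp => pvIsSubAlt ex.2 inp))
  let b2 := example_list.any (fun ex => ex.1.any (fun inp => pvIsInterAlt ex.2 inp))
  let flags : List Int :=
    (if b0 then [0] else []) ++ (if b1 then [1] else []) ++ (if b2 then [4] else [])
  let flags := if flags = [] then [7] else flags
  pvStrOfFlags flags

-- ===== PRECONDITION & SPEC =====
def Spec_get_benchmark_flag (example_list : List ((List (String × String)) × (String × String))) (out : String) : Prop := out = get_benchmark_flag_alt example_list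
instance (example_list : List ((List (String × String)) × (String × String))) (out : String) : Decidable (Spec_get_benchmark_flag example_list out) := by unfold Spec_get_benchmark_flag; infer_instance

-- ===== CLAIM (what is proved, stated in full; the proofs are below) =====
def Claim_equal_get_benchmark_flag : Prop := ∀ (example_list : List ((List (String × String)) × (String × String))), Dom_get_benchmark_flag example_list → Spec_get_benchmark_flag example_list (get_benchmark_flag example_list)

-- ===== LEMMAS AND PROOFS =====

theorem pvAddFlag_nodup (flags : List Int) (f : Int) (h : flags.Nodup) :
    (pvAddFlag flags f).Nodup := by
  unfold pvAddFlag
  split_ifs with hmem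
  · exact h
  · simp only [List.contains_eq_mem, decide_eq_true_eq] at hmem
    simp [List.nodup_append, h]
    intro a ha rfl
    exact hmem ha

theorem mem_pvAddFlag (flags : List Int) (f x : Int) :
    x ∈ pvAddFlag flags f ↔ x ∈ flags ∨ x = f := by
  unfold pvAddFlag
  split_ifs with hmem
  · simp at hmem
    constructor
    · exact Or.inl
    · rintro (h | rfl)
      · exact h
      · exact hmem
  · simp

theorem pvStep_nodup (flags : List Int)
    (ex : (List (String × String)) × (String × String)) (h : flags.Nodup) :
    (pvStep flags ex).Nodup := by
  unfold pvStep
  split_ifs <;>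
    (repeat first | assumption | apply pvAddFlag_nodup)

theorem mem_pvStep (flags : List Int)
    (ex : (List (String × String)) × (String × String)) (x : Int) :
    x ∈ pvStep flags ex ↔ x ∈ flags
      ∨ (x = 0 ∧ ex.1.any (fun inp => pvIsSub inp ex.2))
      ∨ (x = 1 ∧ ex.1.any (fun inp => pvIsSub ex.2 inp))
      ∨ (x = 4 ∧ ex.1.any (fun inp => pvIsInter ex.2 inp)) := by
  simp only [pvStep]
  cases h0 : ex.1.any (fun inp => pvIsSub inp ex.2) <;>
    cases h1 : ex.1.any (fun inp => pvIsSub ex.2 inp) <;>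
      cases h2 : ex.1.any (fun inp => pvIsInter ex.2 inp) <;>
        simp only [if_true, if_false, Bool.false_eq_true,
          mem_pvAddFlag, and_true, and_false, or_false, false_or] <;> tauto

theorem foldl_pvStep_nodup (l : List ((List (String × String)) × (String × String)))
    (flags : List Int) (h : flags.Nodup) : (l.foldl pvStep flags).Nodup := by
  induction l generalizing flags with
  | nil => exact h
  | cons ex t ih => exact ih _ (pvStep_nodup _ _ h)

theorem mem_foldl_pvStep (l : List ((List (String × String)) × (String × String)))
    (flags : List Int) (x : Int) :
    x ∈ l.foldl pvStep flags ↔ x ∈ flags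
      ∨ (x = 0 ∧ l.any (fun ex => ex.1.any (fun inp => pvIsSub inp ex.2)))
      ∨ (x = 1 ∧ l.any (fun ex => ex.1.any (fun inp => pvIsSub ex.2 inp)))
      ∨ (x = 4 ∧ l.any (fun ex => ex.1.any (fun inp => pvIsInter ex.2 inp))) := by
  induction l generalizing flags with
  | nil => simp
  | cons ex t ih =>
    simp only [List.foldl_cons, ih, mem_pvStep, List.any_cons, Bool.or_eq_true]
    tauto

theorem get_benchmark_flag_eq_alt
    (l : List ((List (String × String)) × (String × String))) :
    get_benchmark_flag l = get_benchmark_flag_alt l := by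
  unfold get_benchmark_flag get_benchmark_flag_alt
  have hsub : pvIsSubAlt = pvIsSub := rfl
  have hint : pvIsInterAlt = pvIsInter := rfl
  simp only [hsub, hint]
  set b0 := l.any (fun ex => ex.1.any (fun inp => pvIsSub inp ex.2)) with hb0
  set b1 := l.any (fun ex => ex.1.any (fun inp => pvIsSub ex.2 inp)) with hb1
  set b2 := l.any (fun ex => ex.1.any (fun inp => pvIsInter ex.2 inp)) with hb2
  set fl := l.foldl pvStep [] with hfl
  have hnd : fl.Nodup := foldl_pvStep_nodup l [] (by simp)
  have hmem : ∀ x : Int, x ∈ fl ↔ (x = 0 ∧ b0) ∨ (x = 1 ∧ b1) ∨ (x = 4 ∧ b2) := by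
    intro x
    rw [hfl, mem_foldl_pvStep]
    simp [← hb0, ← hb1, ← hb2]
  set target : List Int :=
    (if b0 then [0] else []) ++ (if b1 then [1] else []) ++ (if b2 then [4] else [])
    with htarget
  have hmemT : ∀ x : Int, x ∈ target ↔ (x = 0 ∧ b0) ∨ (x = 1 ∧ b1) ∨ (x = 4 ∧ b2) := by
    intro x
    rw [htarget]
    cases b0 <;> cases b1 <;> cases b2 <;> simp
  have hndT : target.Nodup := by
    rw [htarget]; cases b0 <;> cases b1 <;> cases b2 <;> decide
  have hperm : target.Perm fl :=
    (List.perm_ext_iff_of_nodup hndT hnd).2 (fun x => by rw [hmemT, hmem])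
  have hpw : target.Pairwise (fun a b : Int => a < b) := by
    rw [htarget]; cases b0 <;> cases b1 <;> cases b2 <;> decide
  have hsorted : PySem.List.sorted fl (fun x => x) false = target :=
    PySem.List.sorted_eq_of_perm_of_pairwise_lt fl target (fun x => x) hperm hpw
  by_cases hnil : fl = []
  · have hT : target = [] := List.Perm.eq_nil (hnil ▸ hperm)
    have h7 : PySem.List.sorted ([7] : List Int) (fun x => x) false = [7] := by decide
    simp [hnil, hT, pvAddFlag, h7]
  · have hlen : fl.length ≠ 0 := by simp [List.length_eq_zero_iff, hnil]
    have hT : target ≠ [] := fun h => hnil (List.Perm.eq_nil ((h ▸ hperm).symm))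
    simp only [if_neg hlen, if_neg hT, hsorted]

-- ===== VERDICT (by name: the statement is the Claim_ definition above) =====
theorem get_benchmark_flag_spec : Claim_equal_get_benchmark_flag := by
  intro l _
  unfold Spec_get_benchmark_flag
  exact get_benchmark_flag_eq_alt l
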